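-- pv_equiv track=rewrite | github.com/pypi-data/pypi-mirror-401 | packages/s1tiling/s1tiling-1.3.0rc4.tar.gz/s1tiling-1.3.0rc4/s1tiling/libs/orbit/_file.py | orbit_range_internal
-- ===== SOURCE A (Python) =====
-- def orbit_range_internal(first: int, last: int, nb_orbits: int):
--     """
--     Generates all possible relate orbit number between ``first`` and ``last``.
--     >>> list(orbit_range_internal(1, 9, 175))
--     [1, 2, 3, 4, 5, 6, 7, 8, 9]
--     >>> list(orbit_range_internal(3, 11, 175))
--     [3, 4, 5, 6, 7, 8, 9, 10, 11]
--     >>> list(orbit_range_internal(170, 174, 175))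
--     [170, 171, 172, 173, 174]
--     >>> list(orbit_range_internal(170, 175, 175))
--     [170, 171, 172, 173, 174, 175]
--     >>> list(orbit_range_internal(170, 176, 175))  # actually a precondition violation
--     Traceback (most recent call last):
--         ...
--     AssertionError
--     >>> list(orbit_range_internal(174, 3, 175))
--     [174, 175, 1, 2, 3]
--     """
--     assert 1 <= first <= nb_orbits
--     assert 1 <= last <= nb_orbits
--     if last < first:
--         last += nb_orbits
--     while first <= last:
--         yield (first - 1) % nb_orbits + 1
--         first += 1
-- ===== SOURCE B (Python) =====
-- def orbit_range_internal(first: int, last: int, nb_orbits: int):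
--     assert 1 <= first <= nb_orbits
--     assert 1 <= last <= nb_orbits
--     if first <= last:
--         yield from range(first, last + 1)
--     else:
--         yield from range(first, nb_orbits + 1)
--         yield from range(1, last + 1)
-- ===== Notes on version B (the rewrite author's own statement) =====
-- stated objective: simpler
-- what changed: Replaces A's single modular-arithmetic while loop with a branch yielding one or two plain contiguous ranges (no wrap arithmetic per element).
import Mathlib
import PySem

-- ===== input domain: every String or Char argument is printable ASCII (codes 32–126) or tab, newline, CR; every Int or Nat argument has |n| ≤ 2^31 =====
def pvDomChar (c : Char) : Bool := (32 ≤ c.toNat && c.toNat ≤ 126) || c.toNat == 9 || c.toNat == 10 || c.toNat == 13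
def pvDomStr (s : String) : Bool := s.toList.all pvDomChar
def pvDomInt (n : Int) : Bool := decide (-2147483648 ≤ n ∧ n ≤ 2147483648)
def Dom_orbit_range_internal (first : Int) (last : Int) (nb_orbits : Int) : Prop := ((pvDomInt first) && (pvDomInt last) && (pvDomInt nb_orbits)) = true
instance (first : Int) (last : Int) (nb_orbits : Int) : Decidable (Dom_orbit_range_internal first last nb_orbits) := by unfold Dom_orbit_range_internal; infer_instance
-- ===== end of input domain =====

-- B replaces A's modular-arithmetic while loop by emitting one or two plain contiguous ranges (objective: simpler).

-- ===== PORT A =====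
-- the while loop runs (last' - first + 1) times, yielding (first + i - 1) % nb_orbits + 1 at step i
def orbit_range_internal (first : Int) (last : Int) (nb_orbits : Int) : List Int :=
  let last' := if last < first then last + nb_orbits else last
  (List.range (last' - first + 1).toNat).map
    (fun i : Nat => PySem.Int.mod (first + (i : Int) - 1) nb_orbits + 1)

-- ===== PORT B =====
def orbit_range_internal_alt (first : Int) (last : Int) (nb_orbits : Int) : List Int :=
  if first ≤ last then
    PySem.List.pyRange first (last + 1) 1
  else
    PySem.List.pyRange first (nb_orbits + 1) 1 ++ PySem.List.pyRange 1 (last + 1) 1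

-- ===== PRECONDITION & SPEC =====
-- Pre_ = exactly A's two assertions: both endpoints in 1..nb_orbits (A raises AssertionError otherwise)
def Pre_orbit_range_internal (first : Int) (last : Int) (nb_orbits : Int) : Prop :=
  1 ≤ first ∧ first ≤ nb_orbits ∧ 1 ≤ last ∧ last ≤ nb_orbits
instance (first : Int) (last : Int) (nb_orbits : Int) : Decidable (Pre_orbit_range_internal first last nb_orbits) := by unfold Pre_orbit_range_internal; infer_instance
def pvWitness_orbit_range_internal : Int × Int × Int := (174, 3, 175)

def Spec_orbit_range_internal (first : Int) (last : Int) (nb_orbits : Int) (out : List Int) : Prop := out = orbit_range_internal_alt first last nb_orbits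
instance (first : Int) (last : Int) (nb_orbits : Int) (out : List Int) : Decidable (Spec_orbit_range_internal first last nb_orbits out) := by unfold Spec_orbit_range_internal; infer_instance

-- ===== CLAIM (what is proved, stated in full; the proofs are below) =====
def Claim_equal_orbit_range_internal : Prop := ∀ (first : Int) (last : Int) (nb_orbits : Int), Dom_orbit_range_internal first last nb_orbits → Pre_orbit_range_internal first last nb_orbits → Spec_orbit_range_internal first last nb_orbits (orbit_range_internal first last nb_orbits)

-- ===== LEMMAS AND PROOFS =====

-- value of Python's % on the band [0, b)
theorem pymod_eq_self (a b : Int) (h0 : 0 ≤ a) (h1 : a < b) : PySem.Int.mod a b = a := by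
  rw [PySem.Int.mod_eq_emod_of_pos (by omega : (0:Int) < b)]
  exact Int.emod_eq_of_lt h0 h1

-- value of Python's % on the band [b, 2b)
theorem pymod_eq_sub (a b : Int) (h0 : b ≤ a) (h1 : a < 2 * b) : PySem.Int.mod a b = a - b := by
  rw [PySem.Int.mod_eq_emod_of_pos (by omega : (0:Int) < b), ← Int.sub_emod_right a b]
  exact Int.emod_eq_of_lt (by omega) (by omega)

-- ===== VERDICT (by name: the statement is the Claim_ definition above) =====
theorem orbit_range_internal_spec : Claim_equal_orbit_range_internal := by
  intro first last nb _ hpre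
  obtain ⟨hf1, hfn, hl1, hln⟩ := hpre
  unfold Spec_orbit_range_internal orbit_range_internal orbit_range_internal_alt
  by_cases hle : first ≤ last
  · -- no wrap: both are the contiguous range first..last
    simp only [if_pos hle, if_neg (by omega : ¬ last < first), PySem.List.pyRange_one]
    apply List.ext_getElem
    · simp only [List.length_map, List.length_range]; omega
    · intro k hk1 hk2
      simp only [List.length_map, List.length_range] at hk1
      simp only [List.getElem_map, List.getElem_range]
      rw [pymod_eq_self _ _ (by omega) (by omega)]
      omega
  · -- wrap: A's modulo folds the tail back to 1..last; B concatenates the two pieces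
    simp only [if_neg hle, if_pos (by omega : last < first), PySem.List.pyRange_one]
    apply List.ext_getElem
    · simp only [List.length_append, List.length_map, List.length_range]; omega
    · intro k hk1 hk2
      simp only [List.length_map, List.length_range] at hk1
      simp only [List.getElem_map, List.getElem_range]
      by_cases hk : k < (nb + 1 - first).toNat
      · rw [List.getElem_append_left (by simp only [List.length_map, List.length_range]; omega)]
        simp only [List.getElem_map, List.getElem_range]
        rw [pymod_eq_self _ _ (by omega) (by omega)]
        omega
      · rw [List.getElem_append_right (by simp only [List.length_map, List.length_range]; omega)]
        simp only [List.getElem_map, List.getElem_range, List.length_map, List.length_range]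
        rw [pymod_eq_sub _ _ (by omega) (by omega)]
        omega
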